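-- pv_equiv track=rewrite | github.com/Ryeong-j/Programmers_Codingtest | 프로그래머스/0/181874. A 강조하기/A 강조하기.py | solution
-- ===== SOURCE A (Python) =====
-- def solution(myString):
--     answer = ''
--     for i in myString:
--         if i.lower() == 'a':
--             answer += 'A'
--         elif i.isupper():
--             answer += i.lower()
--         else:
--             answer += i
--     return answer
-- ===== SOURCE B (Python) =====
-- def solution(myString):
--     return myString.lower().replace('a', 'A')
-- ===== Notes on version B (the rewrite author's own statement) =====
-- stated objective: idiomatic
-- what changed: Replaced the per-character loop with its three-way branch by two whole-string library passes: lowercase everything, then replace every 'a' with 'A'.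
import Mathlib
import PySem

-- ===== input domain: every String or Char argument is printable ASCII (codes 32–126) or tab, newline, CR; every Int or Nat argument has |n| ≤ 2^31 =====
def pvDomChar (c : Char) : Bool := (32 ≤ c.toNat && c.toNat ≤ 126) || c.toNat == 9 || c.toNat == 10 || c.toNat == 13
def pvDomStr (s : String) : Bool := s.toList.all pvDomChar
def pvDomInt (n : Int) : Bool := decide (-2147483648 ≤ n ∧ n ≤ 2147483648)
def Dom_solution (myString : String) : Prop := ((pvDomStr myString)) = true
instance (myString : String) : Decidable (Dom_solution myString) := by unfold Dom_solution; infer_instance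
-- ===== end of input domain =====

-- B replaces A's per-character loop with two whole-string passes (lower, then replace 'a'→'A'); idiomatic, same result.

-- ===== PORT A =====
-- per-character loop, accumulating the answer left to right, each branch appending one character
def solution (myString : String) : String :=
  String.ofList
    (myString.toList.foldl
      (fun answer i =>
        if PySem.Chars.lowerChar i = 'a' then answer ++ ['A']
        else if PySem.Chars.isupper i then answer ++ [PySem.Chars.lowerChar i]
        else answer ++ [i])
      [])

-- ===== PORT B =====
def solution_alt (myString : String) : String :=
  PySem.Str.replace (PySem.Str.lower myString) "a" "A"

-- ===== PRECONDITION & SPEC =====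
def Spec_solution (myString : String) (out : String) : Prop := out = solution_alt myString
instance (myString : String) (out : String) : Decidable (Spec_solution myString out) := by unfold Spec_solution; infer_instance

-- ===== CLAIM (what is proved, stated in full; the proofs are below) =====
def Claim_equal_solution : Prop := ∀ (myString : String), Dom_solution myString → Spec_solution myString (solution myString)

-- ===== LEMMAS AND PROOFS =====

-- replace with the single-char pattern 'a' is a character map
lemma replace_go_single (fuel : Nat) : ∀ (cs acc : List Char), cs.length ≤ fuel →
    PySem.Chars.replace.go ['a'] ['A'] fuel cs acc
      = acc.reverse ++ cs.map (fun c => if c = 'a' then 'A' else c) := by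
  induction fuel with
  | zero =>
    intro cs acc h
    have : cs = [] := List.eq_nil_of_length_eq_zero (Nat.le_zero.mp h)
    subst this
    simp [PySem.Chars.replace.go]
  | succ n ih =>
    intro cs acc h
    cases cs with
    | nil => simp [PySem.Chars.replace.go]
    | cons c t =>
      simp only [PySem.Chars.replace.go, List.isPrefixOf]
      by_cases hc : c = 'a'
      · subst hc
        simp only [List.length_cons, Nat.succ_le_succ_iff] at h
        simp [ih t _ h]
      · simp only [List.length_cons, Nat.succ_le_succ_iff] at h
        simp [ih t _ h, hc, Ne.symm hc]

lemma replace_single (cs : List Char) :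
    PySem.Chars.replace cs ['a'] ['A'] = cs.map (fun c => if c = 'a' then 'A' else c) := by
  simp [PySem.Chars.replace, replace_go_single cs.length cs [] le_rfl]

-- A's loop builds the per-character image of each character, appended left to right
lemma solutionA_foldl (cs : List Char) : ∀ (acc : List Char),
    cs.foldl
      (fun answer i =>
        if PySem.Chars.lowerChar i = 'a' then answer ++ ['A']
        else if PySem.Chars.isupper i then answer ++ [PySem.Chars.lowerChar i]
        else answer ++ [i]) acc
      = acc ++ cs.map (fun i =>
          if PySem.Chars.lowerChar i = 'a' then 'A'
          else if PySem.Chars.isupper i then PySem.Chars.lowerChar i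
          else i) := by
  induction cs with
  | nil => intro acc; simp
  | cons c t ih =>
    intro acc
    simp only [List.foldl_cons, List.map_cons, ih]
    split_ifs <;> simp

-- the two per-character transforms agree on every character
lemma char_eq (c : Char) :
    (if PySem.Chars.lowerChar c = 'a' then 'A'
     else if PySem.Chars.isupper c then PySem.Chars.lowerChar c
     else c)
      = (if PySem.Chars.lowerChar c = 'a' then 'A' else PySem.Chars.lowerChar c) := by
  by_cases h1 : PySem.Chars.lowerChar c = 'a'
  · simp [h1]
  · by_cases h2 : PySem.Chars.isupper c
    · simp [h1, h2]
    · simp [h2, PySem.Chars.lowerChar]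

-- ===== VERDICT (by name: the statement is the Claim_ definition above) =====
theorem solution_spec : Claim_equal_solution := by
  intro s _
  unfold Spec_solution solution solution_alt
  apply String.ext
  rw [PySem.Str.toList_replace, PySem.Str.toList_lower]
  have hab : ("a" : String).toList = ['a'] := rfl
  have hAB : ("A" : String).toList = ['A'] := rfl
  rw [hab, hAB, replace_single]
  simp only [PySem.Chars.lower, List.map_map, String.toList_ofList, solutionA_foldl,
    List.nil_append, List.map_inj_left]
  intro c _
  simpa using char_eq c
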